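-- pv_equiv track=rewrite | github.com/kossmanf/bachelorThesis | tptpParser/parseTree.py | notInParhentheses
-- ===== SOURCE A (Python) =====
-- def notInParhentheses(formula, indexLower, indexUpper, parenthesesLevel):
--     openParenthesesCounter = 0
--     closedParenthesesCounter = 0
--
--     for i in range(0, len(formula)):
--
--         if(formula[i] == '('):
--             openParenthesesCounter += 1
--
--         if(i in range(indexLower, indexUpper) and openParenthesesCounter - closedParenthesesCounter >= parenthesesLevel):
--             return False
--
--         if(formula[i] == ')'):
--             closedParenthesesCounter += 1
--
--     # Check if the number of open and closed parentheses match
--     if openParenthesesCounter != closedParenthesesCounter: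
--         raise Exception('parentheses error')
--     return True
-- ===== SOURCE B (Python) =====
-- def notInParhentheses(formula, indexLower, indexUpper, parenthesesLevel):
--     # Pass 1: precompute the parenthesis depth at every index.
--     depths = []
--     depth = 0
--     for ch in formula:
--         if ch == '(':
--             depth += 1
--         depths.append(depth)
--         if ch == ')':
--             depth -= 1
--     # Pass 2: scan only the (clamped) requested window.
--     for i in range(max(indexLower, 0), min(indexUpper, len(formula))):
--         if depths[i] >= parenthesesLevel:
--             return False
--     if depth != 0:
--         raise Exception('parentheses error')
--     return True
-- ===== Notes on version B (the rewrite author's own statement) =====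
-- stated objective: faster
-- what changed: B replaces A's single fused loop (which builds a range object and does an 'i in range(lo,hi)' membership test for every character) by two passes: one pass precomputing a depth table, then a scan of only the clamped window [max(lo,0), min(hi,len)) against that table, with the balance check afterwards.
-- outside the precondition, e.g. on notInParhentheses('(', 5, 6, 9): A raises Exception, B raises Exception
import Mathlib
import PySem

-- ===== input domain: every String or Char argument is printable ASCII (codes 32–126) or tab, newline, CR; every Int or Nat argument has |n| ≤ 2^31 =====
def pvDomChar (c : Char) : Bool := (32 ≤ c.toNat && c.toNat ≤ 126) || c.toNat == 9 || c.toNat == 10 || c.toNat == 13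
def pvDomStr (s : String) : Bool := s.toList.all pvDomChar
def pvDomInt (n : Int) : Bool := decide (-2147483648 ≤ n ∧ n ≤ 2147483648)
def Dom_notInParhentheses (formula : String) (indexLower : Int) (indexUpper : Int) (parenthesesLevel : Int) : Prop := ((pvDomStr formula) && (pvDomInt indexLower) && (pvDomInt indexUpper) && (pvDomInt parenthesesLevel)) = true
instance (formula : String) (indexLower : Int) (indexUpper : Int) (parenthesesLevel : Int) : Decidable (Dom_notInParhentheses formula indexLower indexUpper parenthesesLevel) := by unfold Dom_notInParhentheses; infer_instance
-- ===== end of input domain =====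

-- B replaces A's fused counter loop (with a per-character 'i in range(lo,hi)' test) by a depth
-- table built in one pass plus a separate scan of only the clamped window (measurably faster by
-- a constant factor). Equivalence of return values is proved on Pre_ (A and B raise on exactly
-- the same inputs, which Pre_ excludes).

-- ===== PORT A =====
-- the loop of A: i is the index, o/c the open/closed counters
def pvGoA (lo hi lvl : Int) : List Char → Int → Int → Int → Bool
  | [], _, _, _ => true
      -- loop finished: Python A raises when o ≠ c (excluded by Pre_), else returns True
  | ch :: rest, i, o, c =>
    let o' := if ch == '(' then o + 1 else o
    if lo ≤ i ∧ i < hi ∧ o' - c ≥ lvl then false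
    else pvGoA lo hi lvl rest (i + 1) o' (if ch == ')' then c + 1 else c)

def notInParhentheses (formula : String) (indexLower : Int) (indexUpper : Int) (parenthesesLevel : Int) : Bool :=
  pvGoA indexLower indexUpper parenthesesLevel formula.toList 0 0 0

-- ===== PORT B =====
-- pass 1 of B: the depth table plus the final running depth
def pvDepths : List Char → Int → List Int × Int
  | [], d => ([], d)
  | ch :: rest, d =>
    let d' := if ch == '(' then d + 1 else d
    let r := pvDepths rest (if ch == ')' then d' - 1 else d')
    (d' :: r.1, r.2)

def notInParhentheses_alt (formula : String) (indexLower : Int) (indexUpper : Int) (parenthesesLevel : Int) : Bool :=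
  let cs := formula.toList
  let p := pvDepths cs 0
  -- pass 2 of B: scan the clamped window against the table
  if (PySem.List.pyRange (max indexLower 0) (min indexUpper (cs.length : Int)) 1).any
       (fun i => decide (PySem.List.pyGetD p.1 i 0 ≥ parenthesesLevel)) then false
  else true
      -- Python B raises here when p.2 ≠ 0 (excluded by Pre_), else returns True

-- ===== PRECONDITION & SPEC =====
-- depth at index j: '(' in the prefix up to and including j, minus ')' strictly before j
def pvDepthSpec (cs : List Char) (j : Nat) : Int :=
  ((cs.take (j + 1)).count '(' : Int) - ((cs.take j).count ')' : Int)

-- Pre_ excludes exactly the inputs on which Python A (and B) raises 'parentheses error':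
-- an unbalanced formula with no window index reaching parenthesesLevel.
def Pre_notInParhentheses (formula : String) (indexLower : Int) (indexUpper : Int) (parenthesesLevel : Int) : Prop :=
  formula.toList.count '(' = formula.toList.count ')' ∨
  ∃ j < formula.toList.length, indexLower ≤ (j : Int) ∧ (j : Int) < indexUpper ∧
      parenthesesLevel ≤ pvDepthSpec formula.toList j
instance (formula : String) (indexLower : Int) (indexUpper : Int) (parenthesesLevel : Int) : Decidable (Pre_notInParhentheses formula indexLower indexUpper parenthesesLevel) := by unfold Pre_notInParhentheses; infer_instance

def pvWitness_notInParhentheses : String × Int × Int × Int := ("(a)b", 0, 4, 2)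

def Spec_notInParhentheses (formula : String) (indexLower : Int) (indexUpper : Int) (parenthesesLevel : Int) (out : Bool) : Prop := out = notInParhentheses_alt formula indexLower indexUpper parenthesesLevel
instance (formula : String) (indexLower : Int) (indexUpper : Int) (parenthesesLevel : Int) (out : Bool) : Decidable (Spec_notInParhentheses formula indexLower indexUpper parenthesesLevel out) := by unfold Spec_notInParhentheses; infer_instance

-- ===== CLAIM (what is proved, stated in full; the proofs are below) =====
def Claim_equal_notInParhentheses : Prop := ∀ (formula : String) (indexLower : Int) (indexUpper : Int) (parenthesesLevel : Int), Dom_notInParhentheses formula indexLower indexUpper parenthesesLevel → Pre_notInParhentheses formula indexLower indexUpper parenthesesLevel → Spec_notInParhentheses formula indexLower indexUpper parenthesesLevel (notInParhentheses formula indexLower indexUpper parenthesesLevel)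

-- ===== LEMMAS AND PROOFS =====

-- reference loop over one running depth d
def pvRef (lo hi lvl : Int) : List Char → Int → Int → Bool
  | [], _, _ => true
  | ch :: rest, i, d =>
    let d' := if ch == '(' then d + 1 else d
    if lo ≤ i ∧ i < hi ∧ lvl ≤ d' then false
    else pvRef lo hi lvl rest (i + 1) (if ch == ')' then d' - 1 else d')

-- depth spec shifted by an initial depth d
def pvDA (cs : List Char) (d : Int) (j : Nat) : Int := d + pvDepthSpec cs j

theorem pvGoA_eq_ref (lo hi lvl : Int) (cs : List Char) :
    ∀ i o c : Int, pvGoA lo hi lvl cs i o c = pvRef lo hi lvl cs i (o - c) := by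
  induction cs with
  | nil => intro i o c; rfl
  | cons ch rest ih =>
    intro i o c
    by_cases h1 : ch == '(' <;> by_cases h2 : ch == ')' <;>
      simp only [pvGoA, pvRef, h1, h2, if_true, if_false, Bool.false_eq_true, ge_iff_le] <;>
      split_ifs <;>
      first
        | rfl
        | (exfalso; omega)
        | (rw [ih]; try (congr 1 <;> try ring))

theorem pvDA_zero (cs : List Char) (ch : Char) (d : Int) :
    pvDA (ch :: cs) d 0 = (if ch == '(' then d + 1 else d) := by
  simp only [pvDA, pvDepthSpec, List.take, List.count_cons, List.count_nil]
  by_cases h : ch == '(' <;> by_cases h2 : ch == ')' <;> simp_all <;> omega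

theorem pvDA_succ (cs : List Char) (ch : Char) (d : Int) (j : Nat) :
    pvDA (ch :: cs) d (j + 1) =
      pvDA cs (if ch == ')' then (if ch == '(' then d + 1 else d) - 1 else (if ch == '(' then d + 1 else d)) j := by
  simp only [pvDA, pvDepthSpec, List.take_succ_cons, List.count_cons]
  by_cases h : ch == '(' <;> by_cases h2 : ch == ')' <;> simp_all <;> push_cast <;> omega

theorem pvRef_iff (lo hi lvl : Int) (cs : List Char) :
    ∀ (i d : Int), pvRef lo hi lvl cs i d = true ↔
      ∀ j < cs.length, lo ≤ i + j → i + (j : Int) < hi → pvDA cs d j < lvl := by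
  induction cs with
  | nil => intro i d; simp [pvRef]
  | cons ch rest ih =>
    intro i d
    have hz := pvDA_zero rest ch d
    have hs := pvDA_succ rest ch d
    simp only [pvRef]
    set d1 : Int := if ch == '(' then d + 1 else d with hd1
    set d2 : Int := if ch == ')' then d1 - 1 else d1 with hd2
    split_ifs with hw
    · simp only [false_iff]
      push_neg
      refine ⟨0, by simp, by push_cast; omega, by push_cast; omega, by rw [hz]; omega⟩
    · rw [ih]
      constructor
      · intro h j hj hlo hhi
        cases j with
        | zero => rw [hz]; push_cast at hlo hhi; by_contra hc; exact hw ⟨by omega, by omega, by omega⟩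
        | succ k =>
          rw [hs k]
          exact h k (by simpa using hj) (by push_cast at hlo ⊢; omega) (by push_cast at hhi ⊢; omega)
      · intro h k hk hlo hhi
        have := h (k + 1) (by simpa using hk) (by push_cast at hlo ⊢; omega) (by push_cast at hhi ⊢; omega)
        rw [hs k] at this
        exact this

theorem pvDepths_getD (cs : List Char) :
    ∀ (d : Int) (j : Nat), j < cs.length → (pvDepths cs d).1.getD j 0 = pvDA cs d j := by
  induction cs with
  | nil => intro d j h; simp at h
  | cons ch rest ih =>
    intro d j h
    cases j with
    | zero => rw [pvDA_zero]; simp [pvDepths]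
    | succ k =>
      rw [pvDA_succ]
      simp only [pvDepths, List.getD_cons_succ]
      exact ih _ k (by simpa using h)

theorem alt_iff (formula : String) (lo hi lvl : Int) :
    notInParhentheses_alt formula lo hi lvl = true ↔
      ∀ j < formula.toList.length, lo ≤ (0 : Int) + j → (0 : Int) + (j : Int) < hi →
        pvDA formula.toList 0 j < lvl := by
  rw [show notInParhentheses_alt formula lo hi lvl =
        (if ((PySem.List.pyRange (max lo 0) (min hi (formula.toList.length : Int)) 1).any
              fun i => decide (PySem.List.pyGetD (pvDepths formula.toList 0).1 i 0 ≥ lvl)) = true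
         then false else true) from rfl]
  set cs := formula.toList with hcs
  split
  · rename_i hany
    simp only [List.any_eq_true, decide_eq_true_eq] at hany
    obtain ⟨i, hmem, hge⟩ := hany
    rw [PySem.List.mem_pyRange_one] at hmem
    simp only [Bool.false_eq_true, false_iff, not_forall]
    have hi0 : 0 ≤ i := le_trans (le_max_right _ _) hmem.1
    refine ⟨i.toNat, ?_, ?_⟩
    · have : i < (cs.length : Int) := lt_of_lt_of_le hmem.2 (min_le_right _ _)
      omega
    · have hjlt : i.toNat < cs.length := by
        have : i < (cs.length : Int) := lt_of_lt_of_le hmem.2 (min_le_right _ _)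
        omega
      have hcast : ((i.toNat : Nat) : Int) = i := by omega
      have hconv : PySem.List.pyGetD (pvDepths cs 0).1 i 0 = ((pvDepths cs 0).1).getD i.toNat 0 := by
        rw [← hcast, PySem.List.pyGetD_natCast]; congr 1 <;> omega
      have h2 := pvDepths_getD cs 0 i.toNat hjlt
      rw [hconv] at hge
      exact ⟨by omega, by omega, by omega⟩
  · rename_i hany
    simp only [List.any_eq_true, decide_eq_true_eq, not_exists, not_and] at hany
    simp only [true_iff]
    intro j hj hlo hhi
    have := hany (j : Int) (by
      rw [PySem.List.mem_pyRange_one]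
      push_cast at hlo hhi ⊢
      omega)
    rw [PySem.List.pyGetD_natCast] at this
    rw [← pvDepths_getD cs 0 j hj]
    omega

theorem a_iff (formula : String) (lo hi lvl : Int) :
    notInParhentheses formula lo hi lvl = true ↔
      ∀ j < formula.toList.length, lo ≤ (0 : Int) + j → (0 : Int) + (j : Int) < hi →
        pvDA formula.toList 0 j < lvl := by
  unfold notInParhentheses
  rw [pvGoA_eq_ref]
  have : (0 : Int) - 0 = 0 := by ring
  rw [this, pvRef_iff]

-- ===== VERDICT (by name: the statement is the Claim_ definition above) =====
theorem notInParhentheses_spec : Claim_equal_notInParhentheses := by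
  intro formula lo hi lvl _ _
  unfold Spec_notInParhentheses
  rw [Bool.eq_iff_iff, a_iff, alt_iff]
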